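-- pv_equiv track=rewrite | github.com/mar-gitacount/kakakukom2 | webdrivertest.py | prices_array_make
-- ===== SOURCE A (Python) =====
-- def prices_array_make(logs):
--     prices_array = []
--     prices_array_item = []
--     itemindex = 1
--     for index, log in enumerate(logs):
--         if itemindex % 2 == 0:
--             prices_array_item.append(log)
--             prices_array.append(prices_array_item)
--             prices_array_item = []
--             itemindex = 1
--         else:
--             prices_array_item.append(log)
--             itemindex = 2
--     return prices_array
-- ===== SOURCE B (Python) =====
-- def prices_array_make(logs):
--     it = iter(logs)
--     return [[a, b] for a, b in zip(it, it)]
-- ===== Notes on version B (the rewrite author's own statement) =====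
-- stated objective: idiomatic
-- what changed: Replaces the stateful itemindex toggle loop with the standard zip(it, it) idiom that consumes the list two elements at a time, dropping a trailing unpaired element implicitly.
import Mathlib
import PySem

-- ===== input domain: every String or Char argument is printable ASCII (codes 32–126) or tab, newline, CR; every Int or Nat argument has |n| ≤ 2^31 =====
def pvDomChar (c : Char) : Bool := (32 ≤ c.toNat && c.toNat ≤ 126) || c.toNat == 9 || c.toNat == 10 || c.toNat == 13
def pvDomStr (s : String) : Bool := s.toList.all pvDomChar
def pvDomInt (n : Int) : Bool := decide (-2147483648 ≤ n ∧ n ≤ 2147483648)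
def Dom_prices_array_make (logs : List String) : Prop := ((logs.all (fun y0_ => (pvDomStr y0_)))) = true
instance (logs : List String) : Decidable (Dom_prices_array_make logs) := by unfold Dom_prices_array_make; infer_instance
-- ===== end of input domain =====

-- B replaces A's stateful itemindex toggle loop with the zip(it, it) pairing idiom (two-at-a-time recursion); objective: idiomatic.


-- ===== PORT A =====
-- one loop step: state = (prices_array, prices_array_item, itemindex); the enumerate index is bound but unused, as in A
def pricesStepA (st : List (List String) × List String × Int) (p : Int × String) :
    List (List String) × List String × Int :=
  let (prices_array, prices_array_item, itemindex) := st
  let (_, log) := p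
  if PySem.Int.mod itemindex 2 = 0 then
    (prices_array ++ [prices_array_item ++ [log]], [], 1)
  else
    (prices_array, prices_array_item ++ [log], 2)

def prices_array_make (logs : List String) : List (List String) :=
  ((PySem.List.enumerate logs 0).foldl pricesStepA ([], [], 1)).1

-- ===== PORT B =====
-- zip(it, it) on one iterator consumes the list two elements at a time; a leftover single element yields no pair
def pairUp (logs : List String) : List (List String) :=
  match logs with
  | a :: b :: rest => [a, b] :: pairUp rest
  | _ => []

def prices_array_make_alt (logs : List String) : List (List String) := pairUp logs

-- ===== PRECONDITION & SPEC =====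
def Spec_prices_array_make (logs : List String) (out : List (List String)) : Prop := out = prices_array_make_alt logs
instance (logs : List String) (out : List (List String)) : Decidable (Spec_prices_array_make logs out) := by unfold Spec_prices_array_make; infer_instance

-- ===== CLAIM (what is proved, stated in full; the proofs are below) =====
def Claim_equal_prices_array_make : Prop := ∀ (logs : List String), Dom_prices_array_make logs → Spec_prices_array_make logs (prices_array_make logs)

-- ===== LEMMAS AND PROOFS =====
-- loop invariant: starting from itemindex = 1 with an empty pending item, A's fold appends exactly the consecutive pairs
lemma pricesLoopA (logs : List String) :
    ∀ (s : Int) (acc : List (List String)),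
      ((PySem.List.enumerate logs s).foldl pricesStepA (acc, [], 1)).1 = acc ++ pairUp logs := by
  induction logs using pairUp.induct with
  | case1 a b rest ih =>
      intro s acc
      simp only [PySem.List.enumerate_cons, List.foldl_cons, pricesStepA, PySem.Int.mod]
      simp only [show Int.fmod 1 2 = 1 by decide, show (1:Int) ≠ 0 by decide,
                 reduceIte, show Int.fmod 2 2 = 0 by decide]
      rw [ih]
      simp [pairUp]
  | case2 l h =>
      intro s acc
      cases l with
      | nil => simp [PySem.List.enumerate_nil, pairUp]
      | cons a t =>
        cases t with
        | nil =>
          simp [PySem.List.enumerate_cons, PySem.List.enumerate_nil, pricesStepA,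
                PySem.Int.mod, pairUp]
        | cons b r => exact absurd rfl (h a b r)

-- ===== VERDICT (by name: the statement is the Claim_ definition above) =====
theorem prices_array_make_spec : Claim_equal_prices_array_make := by
  intro logs _
  show prices_array_make logs = prices_array_make_alt logs
  unfold prices_array_make prices_array_make_alt
  simpa using pricesLoopA logs 0 []
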